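-- pv_equiv track=rewrite | github.com/juicepress-rs/ovzz8g9XUVzasdhnv | linux-firmware-corpus/scrapers/lfwc_scraper/spiders/foscam.py | map_device_class
-- ===== SOURCE A (Python) =====
-- from typing import List
--
-- def map_device_class(
--     device_titles: List[str],
-- ) -> List[str]:
--     def classify(title: str) -> str:
--         title_lower = title.lower()
--         if "camera" in title_lower:
--             return "ipcam"
--         if "video" in title_lower:
--             return "ipcam"
--         if "monitor" in title_lower:
--             return "ip_cam"
--         if "extender" in title_lower:
--             return "repeater"
--         if "recorder" in title_lower:
--             return "recorder"
--         if "system" in title_lower: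
--             return "ip_cam"
--         if "webcam" in title_lower:
--             return "ip_cam"
--
--         return "unknown yet/irrelevant"
--
--     return [classify(title) for title in device_titles]
-- ===== SOURCE B (Python) =====
-- from typing import List
--
-- _RULES = [
--     ("camera", "ipcam"),
--     ("video", "ipcam"),
--     ("monitor", "ip_cam"),
--     ("extender", "repeater"),
--     ("recorder", "recorder"),
--     ("system", "ip_cam"),
--     ("webcam", "ip_cam"),
-- ]
--
-- def map_device_class(device_titles: List[str]) -> List[str]:
--     # keyword-major: sweep the titles once per rule, lowest priority first,
--     # so higher-priority rules overwrite later; no per-title early return.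
--     lows = [t.lower() for t in device_titles]
--     result = ["unknown yet/irrelevant"] * len(lows)
--     for sub, cls in reversed(_RULES):
--         for i, low in enumerate(lows):
--             if sub in low:
--                 result[i] = cls
--     return result
-- ===== Notes on version B (the rewrite author's own statement) =====
-- stated objective: alternative
-- what changed: B inverts the loop nesting: instead of an if-chain deciding each title independently with early returns, it initialises every slot to 'unknown yet/irrelevant' and makes one overwrite sweep over all titles per rule in reverse priority order, so the highest-priority matching rule writes last.
import Mathlib
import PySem

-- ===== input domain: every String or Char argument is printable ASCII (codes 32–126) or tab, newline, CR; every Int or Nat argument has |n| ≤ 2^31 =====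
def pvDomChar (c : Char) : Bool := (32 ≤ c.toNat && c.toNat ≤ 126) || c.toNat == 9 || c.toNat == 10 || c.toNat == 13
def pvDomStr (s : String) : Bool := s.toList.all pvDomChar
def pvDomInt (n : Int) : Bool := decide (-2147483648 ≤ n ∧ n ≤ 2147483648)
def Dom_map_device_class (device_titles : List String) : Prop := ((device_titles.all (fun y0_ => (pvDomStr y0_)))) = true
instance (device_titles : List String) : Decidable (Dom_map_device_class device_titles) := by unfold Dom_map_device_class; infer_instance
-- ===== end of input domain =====

-- B inverts the loops: a per-rule overwrite sweep over all titles, lowest priority first, instead of A's per-title if-chain (alternative; same cost).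

-- ===== PORT A =====
def pvClassifyA (title : String) : String :=
  let title_lower := PySem.Str.lower title
  if PySem.Str.isIn "camera" title_lower then "ipcam"
  else if PySem.Str.isIn "video" title_lower then "ipcam"
  else if PySem.Str.isIn "monitor" title_lower then "ip_cam"
  else if PySem.Str.isIn "extender" title_lower then "repeater"
  else if PySem.Str.isIn "recorder" title_lower then "recorder"
  else if PySem.Str.isIn "system" title_lower then "ip_cam"
  else if PySem.Str.isIn "webcam" title_lower then "ip_cam"
  else "unknown yet/irrelevant"

def map_device_class (device_titles : List String) : List String :=
  device_titles.map pvClassifyA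

-- ===== PORT B =====
def pvRules : List (String × String) :=
  [("camera", "ipcam"), ("video", "ipcam"), ("monitor", "ip_cam"),
   ("extender", "repeater"), ("recorder", "recorder"),
   ("system", "ip_cam"), ("webcam", "ip_cam")]

-- one sweep of Source B's inner loop: overwrite every slot whose title contains the rule's keyword
def pvSweep (lows : List String) (res : List String) (p : String × String) : List String :=
  List.zipWith (fun low r => if PySem.Str.isIn p.1 low then p.2 else r) lows res

def map_device_class_alt (device_titles : List String) : List String :=
  let lows := device_titles.map PySem.Str.lower
  pvRules.reverse.foldl (pvSweep lows) (List.replicate lows.length "unknown yet/irrelevant")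

-- ===== PRECONDITION & SPEC =====
def Spec_map_device_class (device_titles : List String) (out : List String) : Prop := out = map_device_class_alt device_titles
instance (device_titles : List String) (out : List String) : Decidable (Spec_map_device_class device_titles out) := by unfold Spec_map_device_class; infer_instance

-- ===== CLAIM (what is proved, stated in full; the proofs are below) =====
def Claim_equal_map_device_class : Prop := ∀ (device_titles : List String), Dom_map_device_class device_titles → Spec_map_device_class device_titles (map_device_class device_titles)

-- ===== LEMMAS AND PROOFS =====
theorem zipWith_self_map {α β : Type} (g : String → α → β) (f : String → α) :
    ∀ (l : List String), List.zipWith g l (l.map f) = l.map (fun x => g x (f x)) := by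
  intro l; induction l with
  | nil => rfl
  | cons x xs ih => simp [ih]

-- the keyword-major fold, started from a map, stays a map whose per-element function folds the rules
theorem sweep_fold_map (tbl : List (String × String)) :
    ∀ (lows : List String) (f : String → String),
      tbl.foldl (pvSweep lows) (lows.map f)
        = lows.map (fun low => tbl.foldl (fun r p => if PySem.Str.isIn p.1 low then p.2 else r) (f low)) := by
  induction tbl with
  | nil => intro lows f; rfl
  | cons p rest ih =>
      intro lows f
      simp only [List.foldl_cons]
      rw [show pvSweep lows (lows.map f) p
            = lows.map (fun low => if PySem.Str.isIn p.1 low then p.2 else f low) from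
          zipWith_self_map _ _ lows, ih]

theorem classify_eq (t : String) :
    pvRules.reverse.foldl (fun r p => if PySem.Str.isIn p.1 (PySem.Str.lower t) then p.2 else r)
        "unknown yet/irrelevant" = pvClassifyA t := by
  simp [pvRules, pvClassifyA, List.foldl]

theorem replicate_eq_map_const (l : List String) :
    List.replicate l.length "unknown yet/irrelevant" = l.map (fun _ => "unknown yet/irrelevant") := by
  induction l with
  | nil => rfl
  | cons x xs ih => rw [List.length_cons, List.replicate_succ, List.map_cons, ih]

-- ===== VERDICT (by name: the statement is the Claim_ definition above) =====
theorem map_device_class_spec : Claim_equal_map_device_class := by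
  intro ts _
  unfold Spec_map_device_class map_device_class map_device_class_alt
  show List.map pvClassifyA ts
      = List.foldl (pvSweep (ts.map PySem.Str.lower))
          (List.replicate (ts.map PySem.Str.lower).length "unknown yet/irrelevant") pvRules.reverse
  rw [replicate_eq_map_const, sweep_fold_map, List.map_map]
  refine List.map_congr_left (fun t _ => ?_)
  simp only [Function.comp_apply]
  rw [← classify_eq]
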